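-- pv_equiv track=rewrite | github.com/PrinceBashangezi/CS51P-Final-Project | finalproject.py | consistency_def1
-- ===== SOURCE A (Python) =====
-- def consistency_def1(house, pres):
--     """
--     calculates consistency between two dictionaries. The function calculates consistency scores for each key common to
--     both house and president dictionaries based on matching values. The consistency score is represented as a percentage.
--     :param house: (dict): Dictionary representing data from house.
--     :param pres: (dict): Dictionary representing data from president.
--     :return:  dict: Consistency scores for common keys between house and president.
--
--     """
--
--     # Initialize an empty dictionary to store consistency scores
--     consistency = {}
--
--     # Iterate over keys in the president's dictionary
--     for key in pres.keys():
--         # Check if the key is also present in the house's dictionary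
--         if key in house.keys():
--             # Extract the substring from the key, starting from the 5th character
--             key_suffix = key[4:]
--
--             # Check if the key's suffix is not already in the consistency dictionary
--             if key_suffix not in consistency:
--                 # Initialize the consistency score for the key's suffix
--                 consistency[key_suffix] = 0
--
--             # Check if the values for the key in both dictionaries match after stripping newline characters
--             if house[key] == pres[key].strip("\n"):
--                 # Update the consistency score based on a proportional increase
--                 consistency[key_suffix] += int((1 / 12) * 100)
--
--     # Return the final consistency dictionary
--     return consistency
-- ===== SOURCE B (Python) =====
-- def consistency_def1(house, pres):
--     # Pass 1: group the keys common to both dicts by their suffix key[4:],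
--     # preserving first-appearance order of each suffix.
--     groups = {}
--     for key in pres.keys():
--         if key in house.keys():
--             groups.setdefault(key[4:], []).append(key)
--     # Pass 2: score each suffix: 8 points per grouped key whose values match.
--     return {suffix: 8 * sum(1 for k in keys if house[k] == pres[k].strip("\n"))
--             for suffix, keys in groups.items()}
-- ===== Notes on version B (the rewrite author's own statement) =====
-- stated objective: alternative
-- what changed: A builds the per-suffix score dict in one interleaved loop (insert-0-then-increment); B first groups the common keys by suffix into lists, then maps each group to 8 times its number of value-matching keys.
import Mathlib
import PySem

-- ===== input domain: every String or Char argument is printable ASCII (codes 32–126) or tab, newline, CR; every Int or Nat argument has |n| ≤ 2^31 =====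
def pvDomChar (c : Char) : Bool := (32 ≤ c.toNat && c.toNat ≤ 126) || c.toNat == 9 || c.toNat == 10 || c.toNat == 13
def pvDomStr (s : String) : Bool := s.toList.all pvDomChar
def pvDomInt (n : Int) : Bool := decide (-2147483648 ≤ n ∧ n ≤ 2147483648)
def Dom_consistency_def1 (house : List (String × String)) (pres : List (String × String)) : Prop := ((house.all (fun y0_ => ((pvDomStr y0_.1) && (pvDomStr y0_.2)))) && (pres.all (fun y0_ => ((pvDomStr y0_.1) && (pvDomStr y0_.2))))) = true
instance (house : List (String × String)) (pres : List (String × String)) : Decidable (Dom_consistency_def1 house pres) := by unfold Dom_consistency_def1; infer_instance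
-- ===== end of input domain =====

-- B separates grouping-by-suffix from scoring (two passes) instead of A's single
-- interleaved counter loop; same return value, similar cost (objective: alternative).

-- ===== PORT A =====
-- Literal port of A: one loop over pres's keys, maintaining the consistency dict
-- in place.  int((1/12)*100) evaluates exactly to the integer 8.
def consistency_def1 (house : List (String × String)) (pres : List (String × String)) : List (String × Int) :=
  let houseD := PySem.Dict.ofList house
  let presD := PySem.Dict.ofList pres
  let consistency :=
    presD.keys.foldl (fun consistency key =>
      if houseD.contains key then
        let keySuffix := PySem.Str.slice key (some 4) none
        let consistency :=
          if consistency.contains keySuffix then consistency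
          else consistency.insert keySuffix 0
        if houseD.getD key "" == PySem.Str.stripChars (presD.getD key "") "\n" then
          consistency.insert keySuffix (consistency.getD keySuffix 0 + 8)
        else consistency
      else consistency) (PySem.Dict.empty : PySem.Dict String Int)
  consistency.items

-- ===== PORT B =====
-- Port of B: pass 1 groups common keys by suffix (setdefault+append = modify with
-- default [] appending), pass 2 maps each group to its score.
def consistency_def1_alt (house : List (String × String)) (pres : List (String × String)) : List (String × Int) :=
  let houseD := PySem.Dict.ofList house
  let presD := PySem.Dict.ofList pres
  let groups :=
    presD.keys.foldl (fun groups key =>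
      if houseD.contains key then
        groups.modify (PySem.Str.slice key (some 4) none) [] (· ++ [key])
      else groups) (PySem.Dict.empty : PySem.Dict String (List String))
  groups.items.map (fun p =>
    (p.1, 8 * ((p.2.countP (fun k =>
      houseD.getD k "" == PySem.Str.stripChars (presD.getD k "") "\n")) : Int)))

-- ===== PRECONDITION & SPEC =====
def Spec_consistency_def1 (house : List (String × String)) (pres : List (String × String)) (out : List (String × Int)) : Prop := out = consistency_def1_alt house pres
instance (house : List (String × String)) (pres : List (String × String)) (out : List (String × Int)) : Decidable (Spec_consistency_def1 house pres out) := by unfold Spec_consistency_def1; infer_instance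

-- ===== CLAIM (what is proved, stated in full; the proofs are below) =====
def Claim_equal_consistency_def1 : Prop := ∀ (house : List (String × String)) (pres : List (String × String)), Dom_consistency_def1 house pres → Spec_consistency_def1 house pres (consistency_def1 house pres)

-- ===== LEMMAS AND PROOFS =====

-- score of one group of keys
def pvScore (fk : String → Bool) (p : String × List String) : String × Int :=
  (p.1, 8 * ((p.2.countP fk) : Int))

theorem pvStep (hc : String → Bool) (sf : String → String) (fk : String → Bool)
    (g : PySem.Dict String (List String)) (c : PySem.Dict String Int) (k : String)
    (hn : g.keys.Nodup) (hi : c.items = g.items.map (pvScore fk)) :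
    ((if hc k then
        (let c1 := if c.contains (sf k) then c else c.insert (sf k) 0;
         if fk k then c1.insert (sf k) (c1.getD (sf k) 0 + 8) else c1)
      else c) : PySem.Dict String Int).items
    = ((if hc k then g.modify (sf k) [] (· ++ [k]) else g) : PySem.Dict String (List String)).items.map (pvScore fk) := by
  by_cases hck : hc k = true
  · simp only [hck, if_true]
    have hkeys : c.keys = g.keys := by
      simp only [PySem.Dict.keys, hi, List.map_map]; rfl
    have hcont : c.contains (sf k) = g.contains (sf k) := by
      simp only [PySem.Dict.contains_eq_decide_mem_keys, hkeys]
    have hmod : g.modify (sf k) [] (· ++ [k]) = g.insert (sf k) (g.getD (sf k) [] ++ [k]) := rfl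
    by_cases hgs : g.contains (sf k) = true
    · -- suffix already present
      obtain ⟨v, hv⟩ : ∃ v, g.get? (sf k) = some v := by
        have := PySem.Dict.contains_eq_isSome_get? g (sf k)
        rw [hgs] at this
        exact Option.isSome_iff_exists.mp this.symm
      have hold : g.getD (sf k) [] = v := PySem.Dict.getD_of_get?_eq_some g [] hv
      have hcn : c.keys.Nodup := hkeys ▸ hn
      have hmemc : (sf k, (8 : Int) * (v.countP fk : Int)) ∈ c.items := by
        rw [hi]
        exact List.mem_map.mpr ⟨(sf k, v), PySem.Dict.mem_items_of_get?_eq_some g hv, rfl⟩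
      have hcgd : c.getD (sf k) 0 = 8 * (v.countP fk : Int) :=
        PySem.Dict.getD_of_mem_items c hmemc hcn 0
      have hval : ∀ p ∈ g.items, p.1 = sf k → p.2 = v := by
        intro p hp h1
        have : g.getD p.1 [] = p.2 := PySem.Dict.getD_of_mem_items g (by exact hp) hn []
        rw [h1, hold] at this; exact this.symm
      simp only [hcont, hgs, if_true, hmod, hold]
      rw [PySem.Dict.items_insert_of_contains g _ hgs]
      by_cases hfk : fk k = true
      · simp only [hfk, if_true]
        rw [PySem.Dict.items_insert_of_contains c _ (hcont.trans hgs)]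
        rw [hi, List.map_map, List.map_map]
        apply List.map_congr_left
        intro p hp
        simp only [Function.comp_apply, pvScore]
        by_cases h1 : p.1 = sf k
        · have hcnt : ((v ++ [k]).countP fk : Int) = (v.countP fk : Int) + 1 := by
            simp [List.countP_append, hfk]
          simp only [h1, beq_self_eq_true, if_true, hcgd, hcnt, Prod.mk.injEq]
          exact ⟨trivial, by ring⟩
        · simp only [beq_eq_false_iff_ne.mpr h1, Bool.false_eq_true, if_false]
      · have hfk' : fk k = false := by cases h : fk k <;> simp_all
        simp only [hfk', Bool.false_eq_true, if_false]
        rw [hi, List.map_map]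
        apply List.map_congr_left
        intro p hp
        simp only [Function.comp_apply, pvScore]
        by_cases h1 : p.1 = sf k
        · have hp2 := hval p hp h1
          simp only [h1, beq_self_eq_true, if_true, hp2, List.countP_append,
            List.countP_cons, List.countP_nil, hfk', Bool.false_eq_true, if_false,
            Nat.add_zero]
        · simp only [beq_eq_false_iff_ne.mpr h1, Bool.false_eq_true, if_false]
    · -- suffix not yet present
      have hgs' : g.contains (sf k) = false := by
        cases h : g.contains (sf k) <;> simp_all
      have hcs' : c.contains (sf k) = false := hcont.trans hgs'
      have hgd : g.getD (sf k) [] = [] := PySem.Dict.getD_of_not_contains g [] hgs'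
      simp only [hcont, hgs', Bool.false_eq_true, if_false, hmod, hgd, List.nil_append]
      rw [PySem.Dict.items_insert_of_not_contains g _ hgs']
      by_cases hfk : fk k = true
      · simp only [hfk, if_true, PySem.Dict.getD_insert_self, PySem.Dict.insert_insert_self]
        rw [PySem.Dict.items_insert_of_not_contains c _ hcs']
        simp only [List.map_append, hi, List.map_cons, List.map_nil, pvScore,
          List.countP_cons, List.countP_nil, hfk, if_true]
        rfl
      · have hfk' : fk k = false := by cases h : fk k <;> simp_all
        simp only [hfk', Bool.false_eq_true, if_false]
        rw [PySem.Dict.items_insert_of_not_contains c _ hcs']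
        simp only [List.map_append, hi, List.map_cons, List.map_nil, pvScore,
          List.countP_cons, List.countP_nil, hfk', Bool.false_eq_true, if_false]
        rfl
  · have hck' : hc k = false := by cases h : hc k <;> simp_all
    simp only [hck', Bool.false_eq_true, if_false, hi]

theorem pvLoop (ks : List String) (hc : String → Bool) (sf : String → String) (fk : String → Bool)
    (g : PySem.Dict String (List String)) (c : PySem.Dict String Int)
    (hn : g.keys.Nodup) (hi : c.items = g.items.map (pvScore fk)) :
    (ks.foldl (fun c key =>
        if hc key then
          (let c1 := if c.contains (sf key) then c else c.insert (sf key) 0;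
           if fk key then c1.insert (sf key) (c1.getD (sf key) 0 + 8) else c1)
        else c) c).items
    = (ks.foldl (fun g key =>
        if hc key then g.modify (sf key) [] (· ++ [key]) else g) g).items.map (pvScore fk) := by
  induction ks generalizing g c with
  | nil => exact hi
  | cons k ks ih =>
    simp only [List.foldl_cons]
    refine ih _ _ ?_ (pvStep hc sf fk g c k hn hi)
    by_cases h : hc k = true
    · simp only [h, if_true]
      exact PySem.Dict.nodup_keys_insert _ _ _ hn
    · simp only [Bool.not_eq_true] at h
      simp only [h, Bool.false_eq_true, if_false]
      exact hn

-- ===== VERDICT =====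
theorem consistency_def1_spec : Claim_equal_consistency_def1 := by
  intro house pres _
  unfold Spec_consistency_def1 consistency_def1 consistency_def1_alt
  exact pvLoop _ _ _ _ _ _ (by decide) (by rfl)
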